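-- pv_equiv track=rewrite | github.com/ehdrb5011992/Python | Self_study/2019_Summer/Python Basics/Python Basics (Video , pycharm)/scratch.py | available_spots
-- ===== SOURCE A (Python) =====
-- def available_spots(lst, num):
--     count = len(lst) - 1
--     for i in range(len(lst) - 1):
--         if num % 2 == 0:
--             if lst[i] % 2 != 0 and lst[i + 1] % 2 != 0:
--                 count -= 1
--         else:
--             if lst[i] % 2 == 0 and lst[i + 1] % 2 == 0:
--                 count -= 1
--     return count
-- ===== SOURCE B (Python) =====
-- def available_spots(lst, num):
--     # Run-length decomposition: subtract (run_length - 1) for every maximal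
--     # run of elements whose parity is the "bad" one for this num.
--     bad = (num + 1) % 2
--     total = len(lst) - 1
--     n = len(lst)
--     i = 0
--     while i < n:
--         j = i + 1
--         while j < n and lst[j] % 2 == lst[i] % 2:
--             j += 1
--         if lst[i] % 2 == bad:
--             total -= (j - i - 1)
--         i = j
--     return total
-- ===== Notes on version B (the rewrite author's own statement) =====
-- stated objective: alternative
-- what changed: Replaces the pairwise adjacency scan (checking lst[i], lst[i+1] for every i) with a run-length decomposition: group lst into maximal runs of equal parity and subtract run_length-1 for each run whose parity is the bad one for num.
import Mathlib
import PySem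

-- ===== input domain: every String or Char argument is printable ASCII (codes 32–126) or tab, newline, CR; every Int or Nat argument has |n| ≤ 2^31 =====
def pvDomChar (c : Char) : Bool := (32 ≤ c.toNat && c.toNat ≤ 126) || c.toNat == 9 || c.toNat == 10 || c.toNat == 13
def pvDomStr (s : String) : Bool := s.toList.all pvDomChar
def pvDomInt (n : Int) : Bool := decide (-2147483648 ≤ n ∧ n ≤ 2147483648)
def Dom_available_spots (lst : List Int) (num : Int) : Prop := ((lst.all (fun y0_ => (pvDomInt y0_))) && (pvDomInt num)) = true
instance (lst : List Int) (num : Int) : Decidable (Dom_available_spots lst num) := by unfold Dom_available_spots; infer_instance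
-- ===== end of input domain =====

-- B replaces A's pairwise adjacency scan with a run-length (grouping) pass; same cost, different decomposition.

-- ===== PORT A =====
def available_spots (lst : List Int) (num : Int) : Int :=
  (PySem.List.pyRange 0 ((lst.length : Int) - 1) 1).foldl
    (fun count i =>
      if PySem.Int.mod num 2 == 0 then
        if PySem.Int.mod (PySem.List.pyGetD lst i 0) 2 != 0 &&
           PySem.Int.mod (PySem.List.pyGetD lst (i + 1) 0) 2 != 0 then count - 1 else count
      else
        if PySem.Int.mod (PySem.List.pyGetD lst i 0) 2 == 0 &&
           PySem.Int.mod (PySem.List.pyGetD lst (i + 1) 0) 2 == 0 then count - 1 else count)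
    ((lst.length : Int) - 1)

-- ===== PORT B =====
-- the inner `while` scanning to the run's end is takeWhile/dropWhile; the outer `while` is the recursion
def availRuns (bad : Int) : List Int → Int
  | [] => 0
  | x :: xs =>
      let run := xs.takeWhile (fun y => PySem.Int.mod y 2 == PySem.Int.mod x 2)
      let rest := xs.dropWhile (fun y => PySem.Int.mod y 2 == PySem.Int.mod x 2)
      (if PySem.Int.mod x 2 == bad then (run.length : Int) else 0) + availRuns bad rest
termination_by l => l.length
decreasing_by
  simpa using Nat.lt_succ_of_le (List.length_dropWhile_le _ _)

def available_spots_alt (lst : List Int) (num : Int) : Int :=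
  ((lst.length : Int) - 1) - availRuns (PySem.Int.mod (num + 1) 2) lst

-- ===== PRECONDITION & SPEC =====
def Spec_available_spots (lst : List Int) (num : Int) (out : Int) : Prop := out = available_spots_alt lst num
instance (lst : List Int) (num : Int) (out : Int) : Decidable (Spec_available_spots lst num out) := by unfold Spec_available_spots; infer_instance

-- ===== CLAIM (what is proved, stated in full; the proofs are below) =====
def Claim_equal_available_spots : Prop := ∀ (lst : List Int) (num : Int), Dom_available_spots lst num → Spec_available_spots lst num (available_spots lst num)

-- ===== LEMMAS AND PROOFS =====

-- count of adjacent pairs whose two elements both satisfy p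
def pairCnt (p : Int → Bool) : List Int → Int
  | [] => 0
  | [_] => 0
  | x :: y :: t => (if p x && p y then 1 else 0) + pairCnt p (y :: t)

-- decrement-fold = init minus countP
theorem foldl_sub_countP (P : Int → Bool) (l : List Int) (init : Int) :
    l.foldl (fun c i => if P i then c - 1 else c) init = init - (l.countP P : Int) := by
  induction l generalizing init with
  | nil => simp
  | cons a t ih =>
      simp only [List.foldl_cons, List.countP_cons, ih]
      by_cases h : P a
      · simp [h]; ring
      · simp [h]

-- the index-based pair count over range(len-1) equals the structural pair count
theorem countP_range_pairs (p : Int → Bool) (lst : List Int) :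
    ((List.range (lst.length - 1)).countP
        (fun k => p (lst.getD k 0) && p (lst.getD (k + 1) 0)) : Int) = pairCnt p lst := by
  induction lst with
  | nil => simp [pairCnt]
  | cons x xs ih =>
      cases xs with
      | nil => simp [pairCnt]
      | cons y t =>
          have hr : (x :: y :: t : List Int).length - 1 = t.length + 1 := by simp
          rw [hr, List.range_succ_eq_map]
          simp only [List.countP_cons, List.countP_map, pairCnt]
          have ht : ((y :: t : List Int).length - 1) = t.length := by simp
          rw [ht] at ih
          rw [← ih]
          simp only [Function.comp_def, List.getD_cons_succ, List.getD_cons_zero]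
          by_cases h : p x && p y
          · simp [h]; ring
          · simp [h]

-- pairCnt over a run where p is constant, followed by a break
theorem pairCnt_run (p : Int → Bool) (x : Int) (run rest : List Int)
    (hrun : ∀ y ∈ run, p y = p x)
    (hrest : ∀ z t, rest = z :: t → p x = true → p z = false) :
    pairCnt p (x :: (run ++ rest)) =
      (if p x then (run.length : Int) else 0) + pairCnt p rest := by
  induction run generalizing x with
  | nil =>
      cases rest with
      | nil => simp [pairCnt]
      | cons z t =>
          simp only [List.nil_append, pairCnt]
          by_cases hx : p x = true
          · rw [hrest z t rfl hx]; simp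
          · have hx' : p x = false := by simpa using hx
            simp [hx']
  | cons w run' ih =>
      have hw : p w = p x := hrun w (by simp)
      have step : pairCnt p (x :: ((w :: run') ++ rest)) =
          (if p x && p w then 1 else 0) + pairCnt p (w :: (run' ++ rest)) := by
        simp [pairCnt]
      rw [step, ih w (fun y hy => (hrun y (by simp [hy])).trans hw.symm)
            (fun z t h hz => hrest z t h (hw ▸ hz)), hw]
      by_cases hx : p x = true
      · simp [hx]; ring
      · simp [hx]

-- B's run-length pass computes the pair count
theorem availRuns_eq_pairCnt (bad : Int) : ∀ (n : Nat) (lst : List Int), lst.length ≤ n →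
    availRuns bad lst = pairCnt (fun y => PySem.Int.mod y 2 == bad) lst := by
  intro n
  induction n with
  | zero =>
      intro lst h
      have hnil : lst = [] := List.eq_nil_of_length_eq_zero (Nat.le_zero.mp h)
      simp [hnil, availRuns, pairCnt]
  | succ n ih =>
      intro lst h
      cases lst with
      | nil => simp [availRuns, pairCnt]
      | cons x xs =>
          have hxs : xs.length ≤ n := by simpa using h
          rw [availRuns]
          have hsplit : xs = xs.takeWhile (fun y => PySem.Int.mod y 2 == PySem.Int.mod x 2)
              ++ xs.dropWhile (fun y => PySem.Int.mod y 2 == PySem.Int.mod x 2) :=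
            (List.takeWhile_append_dropWhile).symm
          have hrun : ∀ y ∈ xs.takeWhile (fun y => PySem.Int.mod y 2 == PySem.Int.mod x 2),
              (PySem.Int.mod y 2 == bad) = (PySem.Int.mod x 2 == bad) := by
            intro y hy
            have hq := List.mem_takeWhile_imp hy
            have : PySem.Int.mod y 2 = PySem.Int.mod x 2 := beq_iff_eq.mp hq
            rw [this]
          have hrest : ∀ z t,
              xs.dropWhile (fun y => PySem.Int.mod y 2 == PySem.Int.mod x 2) = z :: t →
              (PySem.Int.mod x 2 == bad) = true → (PySem.Int.mod z 2 == bad) = false := by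
            intro z t hzt hx
            have hhd := List.head?_dropWhile_not
              (fun y => PySem.Int.mod y 2 == PySem.Int.mod x 2) xs
            rw [hzt] at hhd
            simp only [List.head?_cons] at hhd
            have hne : PySem.Int.mod z 2 ≠ PySem.Int.mod x 2 := by
              intro hcontra; rw [hcontra] at hhd; simp at hhd
            have hxb : PySem.Int.mod x 2 = bad := beq_iff_eq.mp hx
            rw [← hxb]
            exact beq_eq_false_iff_ne.mpr hne
          conv_rhs => rw [hsplit]
          rw [pairCnt_run _ x _ _ hrun hrest,
              ih _ (le_trans (List.length_dropWhile_le _ _) hxs)]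

-- characterisation of A's fold
theorem available_spots_eq (lst : List Int) (num : Int) :
    available_spots lst num =
      ((lst.length : Int) - 1) -
        pairCnt (fun y => PySem.Int.mod y 2 == PySem.Int.mod (num + 1) 2) lst := by
  unfold available_spots
  have hm : ∀ a : Int, PySem.Int.mod a 2 = a % 2 :=
    fun a => PySem.Int.mod_eq_emod_of_pos (by norm_num)
  have hnum : num % 2 = 0 ∨ num % 2 = 1 := Int.emod_two_eq_zero_or_one num
  have hbody : ∀ (count i : Int),
      (if PySem.Int.mod num 2 == 0 then
        if PySem.Int.mod (PySem.List.pyGetD lst i 0) 2 != 0 &&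
           PySem.Int.mod (PySem.List.pyGetD lst (i + 1) 0) 2 != 0 then count - 1 else count
      else
        if PySem.Int.mod (PySem.List.pyGetD lst i 0) 2 == 0 &&
           PySem.Int.mod (PySem.List.pyGetD lst (i + 1) 0) 2 == 0 then count - 1 else count)
      = (if (PySem.Int.mod (PySem.List.pyGetD lst i 0) 2 == PySem.Int.mod (num + 1) 2) &&
            (PySem.Int.mod (PySem.List.pyGetD lst (i + 1) 0) 2 == PySem.Int.mod (num + 1) 2)
         then count - 1 else count) := by
    intro count i
    set a := PySem.List.pyGetD lst i 0
    set b := PySem.List.pyGetD lst (i + 1) 0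
    have ha : a % 2 = 0 ∨ a % 2 = 1 := Int.emod_two_eq_zero_or_one a
    have hb : b % 2 = 0 ∨ b % 2 = 1 := Int.emod_two_eq_zero_or_one b
    simp only [hm]
    rcases hnum with h | h
    · have h1 : (num + 1) % 2 = 1 := by omega
      rw [h, h1]
      rcases ha with ha | ha <;> rcases hb with hb | hb <;> simp [ha, hb]
    · have h1 : (num + 1) % 2 = 0 := by omega
      rw [h, h1]
      rcases ha with ha | ha <;> rcases hb with hb | hb <;> simp [ha, hb]
  rw [PySem.List.foldl_congr_mem _ _ _ _ (fun c i _ => hbody c i)]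
  rw [foldl_sub_countP]
  congr 1
  rw [← countP_range_pairs]
  rw [PySem.List.pyRange_one]
  simp only [List.countP_map]
  have hn : ((lst.length : Int) - 1 - 0).toNat = lst.length - 1 := by omega
  rw [hn]
  congr 1
  congr 1
  funext k
  have hcast : ((k : Int) + 1) = ((k + 1 : Nat) : Int) := by push_cast; ring
  simp only [Function.comp_def, zero_add, hcast, PySem.List.pyGetD_natCast]

-- ===== VERDICT (by name: the statement is the Claim_ definition above) =====
theorem available_spots_spec : Claim_equal_available_spots := by
  intro lst num _
  unfold Spec_available_spots available_spots_alt
  rw [available_spots_eq, availRuns_eq_pairCnt _ lst.length lst (le_refl _)]
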